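-- pv_equiv track=rewrite | github.com/digitaldebrisvideo/smrig | smrig/lib/nodepathlib.py | add_namespace
-- ===== SOURCE A (Python) =====
-- def add_namespace(node, namespace):
-- 	"""
-- 	Add a namespace to the node path. The function is able to handle full path
-- 	or single path nodes. The provided namespace should not contain the
-- 	trailing semicolon as it will be added via the script.
--
-- 	:param str node:
-- 	:param str namespace:
-- 	:return: Namespaced path
-- 	:rtype: str
-- 	"""
-- 	path = ""
-- 	sections = node.split("|")
-- 	sections_num = len(sections)
--
-- 	for i, section in enumerate(sections):
-- 		if section:
-- 			path += "{}:{}".format(namespace, section)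
--
-- 		if i < sections_num - 1:
-- 			path += "|"
--
-- 	return path
-- ===== SOURCE B (Python) =====
-- def add_namespace(node, namespace):
--     """Single left-to-right scan: copy '|' separators through and prefix
--     'namespace:' to each maximal run of non-'|' characters (no split/join)."""
--     out = []
--     i, n = 0, len(node)
--     while i < n:
--         if node[i] == '|':
--             out.append('|')
--             i += 1
--         else:
--             j = i
--             while j < n and node[j] != '|':
--                 j += 1
--             out.append(namespace + ':' + node[i:j])
--             i = j
--     return ''.join(out)
-- ===== Notes on version B (the rewrite author's own statement) =====
-- stated objective: alternative
-- what changed: Replaces split-on-'|' plus an indexed accumulate-and-rejoin loop by a single left-to-right character scan that copies '|' separators through and rewrites each maximal run of non-'|' characters in place.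
import Mathlib
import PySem

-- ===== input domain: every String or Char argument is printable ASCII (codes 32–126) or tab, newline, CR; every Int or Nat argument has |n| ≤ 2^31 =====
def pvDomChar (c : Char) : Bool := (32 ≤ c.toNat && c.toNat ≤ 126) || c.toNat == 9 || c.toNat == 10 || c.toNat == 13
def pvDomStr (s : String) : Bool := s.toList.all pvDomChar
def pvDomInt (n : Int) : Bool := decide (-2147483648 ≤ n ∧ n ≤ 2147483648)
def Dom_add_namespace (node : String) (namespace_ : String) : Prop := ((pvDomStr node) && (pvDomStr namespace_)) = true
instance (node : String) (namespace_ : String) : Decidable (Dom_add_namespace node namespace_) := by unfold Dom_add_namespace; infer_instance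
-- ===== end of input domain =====

-- B replaces split-on-'|' plus an indexed accumulate-and-rejoin loop by a single
-- left-to-right character scan rewriting each maximal run of non-'|' characters
-- (alternative decomposition; same O(n) cost).

-- ===== PORT A =====
-- the loop body of A's for-loop (closure over namespace_ and sections_num)
def aStep (namespace_ : String) (sections_num : Int) (path : String) (p : Int × String) : String :=
  let path := if p.2 ≠ "" then path ++ namespace_ ++ ":" ++ p.2 else path
  if p.1 < sections_num - 1 then path ++ "|" else path

def add_namespace (node : String) (namespace_ : String) : String :=
  let path : String := ""
  let sections : List String := (PySem.Str.split? node "|").getD []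
  let sections_num : Int := sections.length
  (PySem.List.enumerate sections).foldl (aStep namespace_ sections_num) path

-- ===== PORT B =====
-- the outer while-loop of Source B: copy '|' through, rewrite a maximal non-'|' run
-- (the inner `while j < n and node[j] != '|'` scan is takeWhile/dropWhile)
def altGo (ns : List Char) : List Char → List Char
  | [] => []
  | c :: rest =>
    if c = '|' then '|' :: altGo ns rest
    else (ns ++ ':' :: c :: rest.takeWhile (· ≠ '|')) ++ altGo ns (rest.dropWhile (· ≠ '|'))
termination_by cs => cs.length
decreasing_by
  all_goals simp only [List.length_cons]
  · omega
  · exact Nat.lt_succ_of_le (List.length_dropWhile_le _ _)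

def add_namespace_alt (node : String) (namespace_ : String) : String :=
  String.ofList (altGo namespace_.toList node.toList)

-- ===== PRECONDITION & SPEC =====
def Spec_add_namespace (node : String) (namespace_ : String) (out : String) : Prop := out = add_namespace_alt node namespace_
instance (node : String) (namespace_ : String) (out : String) : Decidable (Spec_add_namespace node namespace_ out) := by unfold Spec_add_namespace; infer_instance

-- ===== CLAIM (what is proved, stated in full; the proofs are below) =====
def Claim_equal_add_namespace : Prop := ∀ (node : String) (namespace_ : String), Dom_add_namespace node namespace_ → Spec_add_namespace node namespace_ (add_namespace node namespace_)

-- ===== LEMMAS AND PROOFS =====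

-- structural characterisation of Python's split("|") on a char list
def splitC : List Char → List (List Char)
  | [] => [[]]
  | c :: rest =>
    if c = '|' then [] :: splitC rest
    else match splitC rest with
         | [] => [[c]]
         | p :: ps => (c :: p) :: ps

theorem splitC_ne_nil (cs : List Char) : splitC cs ≠ [] := by
  cases cs with
  | nil => simp [splitC]
  | cons c rest =>
    simp only [splitC]
    split
    · simp
    · split <;> simp

theorem splitOn_go_char :
    ∀ (cs : List Char) (fuel : Nat), cs.length < fuel → ∀ (cur : List Char) (acc : List (List Char)),
    PySem.Chars.splitOn.go ['|'] fuel cs cur acc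
      = acc.reverse ++ (match splitC cs with
          | [] => []
          | p :: ps => (cur.reverse ++ p) :: ps) := by
  intro cs
  induction cs with
  | nil =>
    intro fuel hf cur acc
    match fuel, hf with
    | fuel + 1, _ =>
      simp [PySem.Chars.splitOn.go, splitC]
  | cons c rest ih =>
    intro fuel hf cur acc
    match fuel, hf with
    | fuel + 1, hf =>
      have hrest : rest.length < fuel := by simpa using Nat.lt_of_succ_lt_succ hf
      by_cases hc : c = '|'
      · subst hc
        have hpre : List.isPrefixOf ['|'] ('|' :: rest) = true := by
          simp [List.isPrefixOf]
        simp only [PySem.Chars.splitOn.go, hpre, if_pos, List.length_singleton,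
          List.drop_one, List.tail_cons]
        rw [ih fuel hrest [] (cur.reverse :: acc)]
        rcases h : splitC rest with _ | ⟨p, ps⟩
        · exact absurd h (splitC_ne_nil rest)
        · simp [splitC, h]
      · have hpre : List.isPrefixOf ['|'] (c :: rest) = false := by
          simp [List.isPrefixOf]
          exact fun h => absurd h.symm hc
        simp only [PySem.Chars.splitOn.go, hpre, Bool.false_eq_true, if_false]
        rw [ih fuel hrest (c :: cur) acc]
        rcases h : splitC rest with _ | ⟨p, ps⟩
        · exact absurd h (splitC_ne_nil rest)
        · simp [splitC, hc, h]

theorem splitOn_char (cs : List Char) :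
    PySem.Chars.splitOn cs ['|'] = splitC cs := by
  unfold PySem.Chars.splitOn
  rw [splitOn_go_char cs (cs.length + 1) (Nat.lt_succ_self _) [] []]
  rcases h : splitC cs with _ | ⟨p, ps⟩
  · exact absurd h (splitC_ne_nil cs)
  · simp

-- the per-section rewrite both sides perform
def fSec (ns : List Char) (sec : List Char) : List Char :=
  if sec = [] then [] else ns ++ ':' :: sec

theorem inter_cons (x : List Char) (xs : List (List Char)) :
    List.intercalate ['|'] (x :: xs)
      = x ++ (match xs with | [] => [] | y :: ys => '|' :: List.intercalate ['|'] (y :: ys)) := by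
  cases xs with
  | nil => simp [List.intercalate]
  | cons y ys => simp [List.intercalate, List.intersperse]

theorem dropWhile_head_not {p : Char → Bool} :
    ∀ (l : List Char) {a : Char} {r : List Char}, l.dropWhile p = a :: r → p a = false := by
  intro l
  induction l with
  | nil => intro a r h; simp [List.dropWhile] at h
  | cons x xs ih =>
    intro a r h
    by_cases hx : p x = true
    · rw [List.dropWhile_cons_of_pos hx] at h; exact ih h
    · rw [List.dropWhile_cons_of_neg hx] at h
      cases h; simpa using hx

-- A's fold over the enumerated sections equals an intercalation of rewritten sections
theorem foldA (ns : String) :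
    ∀ (l : List String) (k : Int) (path : String),
    ((PySem.List.enumerate l k).foldl (aStep ns (k + l.length)) path).toList
      = path.toList ++ List.intercalate ['|'] (l.map (fun s => fSec ns.toList s.toList)) := by
  intro l
  induction l with
  | nil =>
    intro k path
    simp [PySem.List.enumerate, List.intercalate]
  | cons s rest ih =>
    intro k path
    have hstep : PySem.List.enumerate (s :: rest) k = (k, s) :: PySem.List.enumerate rest (k + 1) := by
      simp [PySem.List.enumerate]
    rw [hstep]
    simp only [List.foldl_cons]
    have hn : k + ((s :: rest).length : Int) = (k + 1) + (rest.length : Int) := by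
      simp [List.length_cons]; ring
    rw [hn, ih (k + 1) (aStep ns ((k + 1) + (rest.length : Int)) path (k, s))]
    simp only [List.map_cons]
    rw [inter_cons]
    have hsl : s = "" ∨ s.toList ≠ [] := by
      by_cases hs : s = ""
      · exact Or.inl hs
      · exact Or.inr (fun h => hs (String.toList_eq_nil_iff.mp h))
    cases rest with
    | nil =>
      have hk : ¬ (k < k + 1 + (([] : List String).length : Int) - 1) := by simp
      rcases hsl with hs | hsl
      · subst hs
        simp [aStep, fSec, List.intercalate]
      · have hs : s ≠ "" := fun h => hsl (by simp [h])
        simp [aStep, hs, fSec, hsl, List.intercalate]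
    | cons t ts =>
      rcases hsl with hs | hsl
      · subst hs
        simp only [aStep, ne_eq, not_true_eq_false, if_false]
        split_ifs with h
        · simp [fSec]
        · exfalso; apply h; simp only [List.length_cons]; push_cast; omega
      · have hs : s ≠ "" := fun h => hsl (by simp [h])
        simp only [aStep, ne_eq, hs, not_false_eq_true, if_true]
        split_ifs with h
        · simp [fSec, hsl]
        · exfalso; apply h; simp only [List.length_cons]; push_cast; omega

-- splitC as takeWhile/dropWhile, matching B's scan
theorem splitC_take_drop :
    ∀ (cs : List Char), splitC cs
      = cs.takeWhile (· ≠ '|') ::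
        (match cs.dropWhile (· ≠ '|') with | [] => [] | _ :: r => splitC r) := by
  intro cs
  induction cs with
  | nil => simp [splitC]
  | cons c rest ih =>
    by_cases hc : c = '|'
    · subst hc
      simp [splitC]
    · simp only [List.takeWhile_cons, List.dropWhile_cons]
      rw [show splitC (c :: rest)
            = (match splitC rest with | [] => [[c]] | p :: ps => (c :: p) :: ps)
          from by simp [splitC, hc]]
      rw [ih]
      simp [hc]

-- B's scan equals the same intercalation
theorem altGo_eq (ns : List Char) :
    ∀ (cs : List Char), altGo ns cs = List.intercalate ['|'] ((splitC cs).map (fSec ns)) := by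
  intro cs
  induction hcs : cs.length using Nat.strong_induction_on generalizing cs with
  | _ n ih =>
    cases cs with
    | nil => simp [altGo, splitC, fSec, List.intercalate]
    | cons c rest =>
      subst hcs
      by_cases hc : c = '|'
      · subst hc
        rw [show altGo ns ('|' :: rest) = '|' :: altGo ns rest from by rw [altGo]; simp]
        rw [ih rest.length (by simp) rest rfl]
        rw [show splitC ('|' :: rest) = [] :: splitC rest from by simp [splitC]]
        simp only [List.map_cons]
        rw [inter_cons]
        rcases h : splitC rest with _ | ⟨p, ps⟩
        · exact absurd h (splitC_ne_nil rest)
        · simp [fSec]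
      · rw [show altGo ns (c :: rest)
              = (ns ++ ':' :: c :: rest.takeWhile (· ≠ '|')) ++ altGo ns (rest.dropWhile (· ≠ '|'))
            from by rw [altGo]; simp [hc]]
        rw [splitC_take_drop (c :: rest)]
        simp only [List.takeWhile_cons, List.dropWhile_cons]
        simp only [ne_eq, hc, not_false_eq_true, decide_true, if_true]
        rcases hd : rest.dropWhile (· ≠ '|') with _ | ⟨a, r⟩
        · simp [altGo, fSec, List.intercalate]
        · have ha : a = '|' := by
            have := dropWhile_head_not rest hd
            simpa using this
          subst ha
          have hlen : r.length < (c :: rest).length := by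
            have h1 : ('|' :: r).length ≤ rest.length := hd ▸ List.length_dropWhile_le _ _
            simp only [List.length_cons] at h1 ⊢
            omega
          rw [show altGo ns ('|' :: r) = '|' :: altGo ns r from by rw [altGo]; simp]
          rw [ih r.length hlen r rfl]
          simp only [List.map_cons]
          rw [inter_cons]
          rcases h : splitC r with _ | ⟨p, ps⟩
          · exact absurd h (splitC_ne_nil r)
          · simp [fSec]

-- ===== VERDICT (by name: the statement is the Claim_ definition above) =====
theorem add_namespace_spec : Claim_equal_add_namespace := by
  intro node namespace_ _
  unfold Spec_add_namespace add_namespace add_namespace_alt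
  have hsec : (PySem.Str.split? node "|").getD []
      = (splitC node.toList).map String.ofList := by
    simp only [PySem.Str.split?, PySem.Chars.split?]
    rw [show ("|" : String).toList = ['|'] from rfl]
    simp [splitOn_char]
  rw [hsec]
  apply String.toList_injective
  have hfold := foldA namespace_ ((splitC node.toList).map String.ofList) 0 ""
  rw [zero_add] at hfold
  rw [hfold, String.toList_ofList, altGo_eq]
  simp [List.map_map, Function.comp_def, String.toList_ofList]
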